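-- pv_equiv track=rewrite | github.com/pola-hany/text-bot1 | fonts/english_fonts.py | to_fraktur
-- ===== SOURCE A (Python) =====
-- def to_fraktur(text):
--     fraktur_map = {'A': '𝔄', 'B': '𝔅', 'C': 'ℭ', 'D': '𝔇', 'E': '𝔈', 'F': '𝔉', 'G': '𝔊',
--                    'H': 'ℌ', 'I': 'ℑ', 'J': '𝔍', 'K': '𝔎', 'L': '𝔏', 'M': '𝔐', 'N': '𝔑',
--                    'O': '𝔒', 'P': '𝔓', 'Q': '𝔔', 'R': 'ℜ', 'S': '𝔖', 'T': '𝔗', 'U': '𝔘',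
--                    'V': '𝔙', 'W': '𝔚', 'X': '𝔛', 'Y': '𝔜', 'Z': 'ℨ',
--                    'a': '𝔞', 'b': '𝔟', 'c': '𝔠', 'd': '𝔡', 'e': '𝔢', 'f': '𝔣', 'g': '𝔤',
--                    'h': '𝔥', 'i': '𝔦', 'j': '𝔧', 'k': '𝔨', 'l': '𝔩', 'm': '𝔪', 'n': '𝔫',
--                    'o': '𝔬', 'p': '𝔭', 'q': '𝔮', 'r': '𝔯', 's': '𝔰', 't': '𝔱', 'u': '𝔲',
--                    'v': '𝔳', 'w': '𝔴', 'x': '𝔵', 'y': '𝔶', 'z': '𝔷'}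
--     return ''.join([fraktur_map.get(c, c) for c in text])
-- ===== SOURCE B (Python) =====
-- # Arithmetic on code points instead of a 52-entry dict; five irregular uppercase letters handled explicitly.
-- _UPPER_HOLES = {'C': '\u212d', 'H': '\u210c', 'I': '\u2111', 'R': '\u211c', 'Z': '\u2128'}
--
-- def _frak(c):
--     if 'a' <= c <= 'z':
--         return chr(0x1D51E + ord(c) - ord('a'))
--     if 'A' <= c <= 'Z':
--         return _UPPER_HOLES.get(c) or chr(0x1D504 + ord(c) - ord('A'))
--     return c
--
-- def to_fraktur(text):
--     return ''.join(map(_frak, text))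
-- ===== Notes on version B (the rewrite author's own statement) =====
-- stated objective: simpler
-- what changed: Replaces the 52-entry lookup dict with code-point arithmetic on the contiguous Fraktur blocks, keeping only a 5-entry exception table for the uppercase holes C,H,I,R,Z.
import Mathlib
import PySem

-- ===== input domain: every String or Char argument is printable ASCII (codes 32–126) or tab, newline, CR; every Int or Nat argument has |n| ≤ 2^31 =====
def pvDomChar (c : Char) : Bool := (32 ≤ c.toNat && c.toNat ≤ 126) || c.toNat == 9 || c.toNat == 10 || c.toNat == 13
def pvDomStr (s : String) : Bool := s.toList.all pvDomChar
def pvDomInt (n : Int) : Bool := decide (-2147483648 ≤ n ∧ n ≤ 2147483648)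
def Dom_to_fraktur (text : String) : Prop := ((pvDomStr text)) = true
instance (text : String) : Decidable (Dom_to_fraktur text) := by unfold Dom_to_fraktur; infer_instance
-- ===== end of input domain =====

set_option maxRecDepth 4000


-- B replaces A's 52-entry lookup dict by code-point arithmetic on the contiguous Fraktur
-- blocks, with a 5-entry exception table for the uppercase holes C,H,I,R,Z (objective: simpler).

-- ===== PORT A =====
-- the literal fraktur_map of A (each Python value is a single character)
def frakturMap : PySem.Dict Char Char := PySem.Dict.ofList
  [('A', '𝔄'), ('B', '𝔅'), ('C', 'ℭ'), ('D', '𝔇'), ('E', '𝔈'), ('F', '𝔉'), ('G', '𝔊'),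
   ('H', 'ℌ'), ('I', 'ℑ'), ('J', '𝔍'), ('K', '𝔎'), ('L', '𝔏'), ('M', '𝔐'), ('N', '𝔑'),
   ('O', '𝔒'), ('P', '𝔓'), ('Q', '𝔔'), ('R', 'ℜ'), ('S', '𝔖'), ('T', '𝔗'), ('U', '𝔘'),
   ('V', '𝔙'), ('W', '𝔚'), ('X', '𝔛'), ('Y', '𝔜'), ('Z', 'ℨ'),
   ('a', '𝔞'), ('b', '𝔟'), ('c', '𝔠'), ('d', '𝔡'), ('e', '𝔢'), ('f', '𝔣'), ('g', '𝔤'),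
   ('h', '𝔥'), ('i', '𝔦'), ('j', '𝔧'), ('k', '𝔨'), ('l', '𝔩'), ('m', '𝔪'), ('n', '𝔫'),
   ('o', '𝔬'), ('p', '𝔭'), ('q', '𝔮'), ('r', '𝔯'), ('s', '𝔰'), ('t', '𝔱'), ('u', '𝔲'),
   ('v', '𝔳'), ('w', '𝔴'), ('x', '𝔵'), ('y', '𝔶'), ('z', '𝔷')]

-- ''.join([fraktur_map.get(c, c) for c in text])
def to_fraktur (text : String) : String :=
  String.ofList (text.toList.map (fun c => frakturMap.getD c c))

-- ===== PORT B =====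
-- the five uppercase letters whose Fraktur forms live outside the contiguous block
def frakUpperHoles : PySem.Dict Char Char := PySem.Dict.ofList
  [('C', 'ℭ'), ('H', 'ℌ'), ('I', 'ℑ'), ('R', 'ℜ'), ('Z', 'ℨ')]

def frakChar (c : Char) : Char :=
  if 'a' ≤ c ∧ c ≤ 'z' then Char.ofNat (0x1D51E + c.toNat - 97)
  else if 'A' ≤ c ∧ c ≤ 'Z' then
    match frakUpperHoles.get? c with
    | some d => d
    | none => Char.ofNat (0x1D504 + c.toNat - 65)
  else c

def to_fraktur_alt (text : String) : String :=
  String.ofList (text.toList.map frakChar)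

-- ===== PRECONDITION & SPEC =====
def Spec_to_fraktur (text : String) (out : String) : Prop := out = to_fraktur_alt text
instance (text : String) (out : String) : Decidable (Spec_to_fraktur text out) := by unfold Spec_to_fraktur; infer_instance

-- ===== CLAIM (what is proved, stated in full; the proofs are below) =====
def Claim_equal_to_fraktur : Prop := ∀ (text : String), Dom_to_fraktur text → Spec_to_fraktur text (to_fraktur text)

-- ===== LEMMAS AND PROOFS =====
-- the two per-character maps agree on every ASCII code point
theorem frak_agree_ascii : ∀ n : Fin 128,
    frakturMap.getD (Char.ofNat n.val) (Char.ofNat n.val) = frakChar (Char.ofNat n.val) := by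
  decide

theorem frak_agree (c : Char) (h : pvDomChar c = true) :
    frakturMap.getD c c = frakChar c := by
  have hlt : c.toNat < 128 := by
    simp [pvDomChar] at h
    omega
  have hc : Char.ofNat c.toNat = c := Char.ofNat_toNat c
  have := frak_agree_ascii ⟨c.toNat, hlt⟩
  simpa [hc] using this

-- ===== VERDICT (by name: the statement is the Claim_ definition above) =====
theorem to_fraktur_spec : Claim_equal_to_fraktur := by
  intro text hdom
  unfold Spec_to_fraktur to_fraktur to_fraktur_alt
  have hall : ∀ c ∈ text.toList, pvDomChar c = true := by
    simpa [Dom_to_fraktur, pvDomStr, List.all_eq_true] using hdom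
  congr 1
  exact List.map_congr_left (fun c hc => frak_agree c (hall c hc))
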